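-- pv_equiv track=rewrite | github.com/hurryabit/adventofcode-2023 | python/day13b.py | analyse_vertically
-- ===== SOURCE A (Python) =====
-- def analyse_vertically(pattern: list[str]) -> set[int]:
--     result = set()
--     for i in range(1, len(pattern)):
--         if all(
--             pattern[i - 1 - j] == pattern[i + j]
--             for j in range(min(i, len(pattern) - i))
--         ):
--             result.add(i)
--     return result
-- ===== SOURCE B (Python) =====
-- def analyse_vertically(pattern: list[str]) -> set[int]:
--     # Manacher's algorithm for even-length palindromic centers: rad[i] is the
--     # largest k with pattern[i-k:i+k] an even palindrome; a mirror line at i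
--     # exists iff that palindrome reaches a boundary, i.e. rad[i] >= min(i, n-i).
--     # The (l, r) window reuses previously computed radii, so the total number
--     # of row comparisons is O(n) instead of A's O(n^2).
--     n = len(pattern)
--     rad = [0] * (n + 1)
--     l, r = 0, -1
--     for i in range(1, n):
--         k = min(rad[l + r + 1 - i], r - i + 1) if i <= r else 0
--         while k < i and i + k < n and pattern[i - k - 1] == pattern[i + k]:
--             k += 1
--         rad[i] = k
--         if i + k - 1 > r:
--             l, r = i - k, i + k - 1
--     return {i for i in range(1, n) if rad[i] >= min(i, n - i)}
-- ===== Notes on version B (the rewrite author's own statement) =====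
-- stated objective: faster
-- what changed: B replaces A's per-centre pairwise re-scan with Manacher's algorithm for even-length palindromic centres: one left-to-right pass computes every palindrome radius while reusing the radii mirrored inside the rightmost known palindrome window, and a mirror line at i is exactly a radius reaching a boundary (rad[i] >= min(i, n-i)).
import Mathlib
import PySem

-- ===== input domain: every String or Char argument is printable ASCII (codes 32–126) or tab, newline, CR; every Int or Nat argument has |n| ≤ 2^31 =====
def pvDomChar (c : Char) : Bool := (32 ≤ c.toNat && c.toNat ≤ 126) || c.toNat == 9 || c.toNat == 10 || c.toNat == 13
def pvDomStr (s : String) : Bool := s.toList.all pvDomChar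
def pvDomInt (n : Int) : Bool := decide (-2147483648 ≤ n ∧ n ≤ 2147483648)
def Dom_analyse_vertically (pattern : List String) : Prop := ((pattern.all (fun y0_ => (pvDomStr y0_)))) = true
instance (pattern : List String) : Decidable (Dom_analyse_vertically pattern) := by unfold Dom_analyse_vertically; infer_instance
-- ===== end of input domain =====

-- B replaces A's per-centre pairwise re-scan with Manacher's algorithm for even-length
-- palindromic centers: it computes every palindrome radius in one pass reusing earlier
-- radii, then a mirror line at i is exactly a radius reaching a boundary (rad[i] >= min(i, n-i)).

-- ===== PORT A =====
def analyse_vertically (pattern : List String) : List Int :=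
  (PySem.List.pyRange 1 (PySem.List.len pattern) 1).foldl
    (fun result i =>
      if (PySem.List.pyRange 0 (min i (PySem.List.len pattern - i)) 1).all
           (fun j => PySem.List.pyGet? pattern (i - 1 - j) == PySem.List.pyGet? pattern (i + j))
      then PySem.Set.add result i else result)
    PySem.Set.empty

-- ===== PORT B =====
-- the while loop 'while k < i and i + k < n and pattern[i-k-1] == pattern[i+k]: k += 1';
-- fuel only makes the recursion structural (the guard k < i stops it first, see pvExtend_char)
def pvExtend (pattern : List String) (i k : Int) (fuel : Nat) : Int :=
  match fuel with
  | 0 => k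
  | fuel + 1 =>
    if k < i ∧ i + k < (pattern.length : Int) ∧
        PySem.List.pyGetD pattern (i - k - 1) "" = PySem.List.pyGetD pattern (i + k) ""
    then pvExtend pattern i (k + 1) fuel else k

-- one iteration of the for-loop: state (rad, l, r)
def pvManacherStep (pattern : List String) (st : List Int × Int × Int) (i : Int) :
    List Int × Int × Int :=
  let k0 := if i ≤ st.2.2
    then min (PySem.List.pyGetD st.1 (st.2.1 + st.2.2 + 1 - i) 0) (st.2.2 - i + 1) else 0
  let k := pvExtend pattern i k0 pattern.length
  let rad' := PySem.List.pySetD st.1 i k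
  if i + k - 1 > st.2.2 then (rad', i - k, i + k - 1) else (rad', st.2.1, st.2.2)

def analyse_vertically_alt (pattern : List String) : List Int :=
  let n : Int := PySem.List.len pattern
  let st := (PySem.List.pyRange 1 n 1).foldl (pvManacherStep pattern)
    (List.replicate (pattern.length + 1) 0, 0, -1)
  (PySem.List.pyRange 1 n 1).foldl
    (fun result i =>
      if min i (n - i) ≤ PySem.List.pyGetD st.1 i 0
      then PySem.Set.add result i else result)
    PySem.Set.empty

-- ===== PRECONDITION & SPEC =====
def Spec_analyse_vertically (pattern : List String) (out : List Int) : Prop := out = analyse_vertically_alt pattern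
instance (pattern : List String) (out : List Int) : Decidable (Spec_analyse_vertically pattern out) := by unfold Spec_analyse_vertically; infer_instance

-- ===== CLAIM (what is proved, stated in full; the proofs are below) =====
def Claim_equal_analyse_vertically : Prop := ∀ (pattern : List String), Dom_analyse_vertically pattern → Spec_analyse_vertically pattern (analyse_vertically pattern)

-- ===== LEMMAS AND PROOFS =====

-- the first k offsets around the gap at i match
def pvGoodTo (p : List String) (i k : Int) : Prop :=
  ∀ j : Int, 0 ≤ j → j < k →
    PySem.List.pyGetD p (i - j - 1) "" = PySem.List.pyGetD p (i + j) ""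

-- the radius can be extended past k (the while-guard)
def pvStep (p : List String) (i k : Int) : Prop :=
  k < i ∧ i + k < (p.length : Int) ∧
    PySem.List.pyGetD p (i - k - 1) "" = PySem.List.pyGetD p (i + k) ""

-- k is THE maximal (boundary-clamped) palindrome radius at gap i
def pvChar (p : List String) (i k : Int) : Prop :=
  0 ≤ k ∧ k ≤ i ∧ i + k ≤ (p.length : Int) ∧ pvGoodTo p i k ∧ ¬ pvStep p i k

-- palindrome symmetry of a good window, both directions of the centre
lemma pvGoodTo_sym (p : List String) (c kc : Int) (hg : pvGoodTo p c kc)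
    (a : Int) (h1 : -kc ≤ a) (h2 : a < kc) :
    PySem.List.pyGetD p (c - a - 1) "" = PySem.List.pyGetD p (c + a) "" := by
  rcases (by omega : 0 ≤ a ∨ a < 0) with ha | ha
  · exact hg a ha h2
  · have := hg (-1 - a) (by omega) (by omega)
    have e1 : c - (-1 - a) - 1 = c + a := by ring
    have e2 : c + (-1 - a) = c - a - 1 := by ring
    rw [e1, e2] at this
    exact this.symm

-- Manacher's jump: the mirrored radius is a valid starting radius at i
lemma pvJump (p : List String) (c i kc kj : Int)
    (hci : c < i) (hir : i ≤ c + kc - 1)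
    (hc : pvChar p c kc) (hj : pvChar p (2 * c - i) kj) :
    0 ≤ min kj (c + kc - i) ∧ min kj (c + kc - i) ≤ i ∧
      i + min kj (c + kc - i) ≤ (p.length : Int) ∧ pvGoodTo p i (min kj (c + kc - i)) := by
  obtain ⟨c0, c1, c2, c3, -⟩ := hc
  obtain ⟨j0, j1, j2, j3, -⟩ := hj
  refine ⟨by omega, by omega, by omega, ?_⟩
  intro s hs0 hs
  have hs' : s < min kj (c + kc - i) := hs
  -- f(i+s) = f(2c - i - 1 - s)  via symmetry at c with a = i - c + s
  have e1 := pvGoodTo_sym p c kc c3 (i - c + s) (by omega) (by omega)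
  -- f(i - s - 1) = f(2c - i + s) via symmetry at c with a = c - i + s
  have e2 := pvGoodTo_sym p c kc c3 (c - i + s) (by omega) (by omega)
  -- f(2c - i - s - 1) = f(2c - i + s) via goodness at the mirror centre
  have e3 := j3 s hs0 (by omega)
  have r1 : c - (i - c + s) - 1 = 2 * c - i - s - 1 := by ring
  have r2 : c + (i - c + s) = i + s := by ring
  have r3 : c - (c - i + s) - 1 = i - s - 1 := by ring
  have r4 : c + (c - i + s) = 2 * c - i + s := by ring
  have r5 : 2 * c - i - s - 1 = 2 * c - i - s - 1 := rfl
  rw [r1, r2] at e1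
  rw [r3, r4] at e2
  have r6 : (2 : Int) * c - i - s - 1 = 2 * c - i - s - 1 := rfl
  -- e3 : f(2c-i - s - 1) = f(2c-i + s)
  have e3' : PySem.List.pyGetD p (2 * c - i - s - 1) "" = PySem.List.pyGetD p (2 * c - i + s) "" := by
    have rr : 2 * c - i - s - 1 = 2 * c - i - s - 1 := rfl
    simpa using e3
  calc PySem.List.pyGetD p (i - s - 1) ""
      = PySem.List.pyGetD p (2 * c - i + s) "" := e2
    _ = PySem.List.pyGetD p (2 * c - i - s - 1) "" := e3'.symm
    _ = PySem.List.pyGetD p (i + s) "" := by rw [e1]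

-- the while loop computes the characterised radius, given a valid start
lemma pvExtend_char (p : List String) (i : Int) :
    ∀ (fuel : Nat) (k : Int), 0 ≤ k → k ≤ i → i + k ≤ (p.length : Int) → pvGoodTo p i k →
    (i - k).toNat < fuel → pvChar p i (pvExtend p i k fuel) := by
  intro fuel
  induction fuel with
  | zero => intro k _ _ _ _ hf; omega
  | succ fuel ih =>
    intro k h0 h1 h2 hg hf
    rw [pvExtend]
    split
    · next h =>
      obtain ⟨hk1, hk2, hk3⟩ := h
      refine ih (k + 1) (by omega) (by omega) (by omega) ?_ (by omega)
      intro j hj0 hj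
      rcases lt_or_eq_of_le (by omega : j ≤ k) with hlt | heq
      · exact hg j hj0 hlt
      · subst heq; exact hk3
    · next h =>
      exact ⟨h0, h1, h2, hg, h⟩

-- the loop invariant for the Manacher fold
def pvInv (p : List String) (i : Int) (st : List Int × Int × Int) : Prop :=
  st.1.length = p.length + 1 ∧
  (∀ t : Int, 1 ≤ t → t < i → pvChar p t (PySem.List.pyGetD st.1 t 0)) ∧
  ((st.2.1 = 0 ∧ st.2.2 = -1) ∨
    ∃ c : Int, 1 ≤ c ∧ c < i ∧ st.2.1 = c - PySem.List.pyGetD st.1 c 0 ∧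
      st.2.2 = c + PySem.List.pyGetD st.1 c 0 - 1)

-- reading a pySetD-updated list (all indices in range)
lemma pvGetSet (xs : List Int) (i t k : Int) (h0 : 0 ≤ i) (_h1 : i < (xs.length : Int))
    (ht0 : 0 ≤ t) (ht : t < (xs.length : Int)) :
    PySem.List.pyGetD (PySem.List.pySetD xs i k) t 0
      = if t = i then k else PySem.List.pyGetD xs t 0 := by
  rw [PySem.List.pySetD_of_nonneg xs k h0,
    PySem.List.pyGetD_eq_getElem _ 0 ht0 (by simpa using ht),
    PySem.List.pyGetD_eq_getElem _ 0 ht0 ht]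
  rw [List.getElem_set]
  split_ifs with h2 h3 h3
  · rfl
  · omega
  · omega
  · rfl

lemma pvInv_step (p : List String) (i : Int) (st : List Int × Int × Int)
    (h1i : 1 ≤ i) (hin : i < (p.length : Int)) (hInv : pvInv p i st) :
    pvInv p (i + 1) (pvManacherStep p st i) := by
  obtain ⟨rad, l, r⟩ := st
  obtain ⟨hlen, hchar, hwin⟩ := hInv
  simp only at hlen hchar hwin
  -- the starting radius is sound
  have hk0 : ∀ k0 : Int, k0 = (if i ≤ r
        then min (PySem.List.pyGetD rad (l + r + 1 - i) 0) (r - i + 1) else 0) →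
      0 ≤ k0 ∧ k0 ≤ i ∧ i + k0 ≤ (p.length : Int) ∧ pvGoodTo p i k0 := by
    intro k0 hk0def
    by_cases hir : i ≤ r
    · rw [if_pos hir] at hk0def
      rcases hwin with ⟨-, hr⟩ | ⟨c, hc1, hci, hl, hr⟩
      · omega
      · have hc := hchar c hc1 hci
        obtain ⟨c0, c1, c2, c3, -⟩ := hc
        have hj1 : 1 ≤ 2 * c - i := by omega
        have hji : 2 * c - i < i := by omega
        have hj := hchar (2 * c - i) hj1 (by omega)
        have hmirror : l + r + 1 - i = 2 * c - i := by omega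
        rw [hmirror] at hk0def
        have := pvJump p c i (PySem.List.pyGetD rad c 0) (PySem.List.pyGetD rad (2 * c - i) 0)
          hci (by omega) (hchar c hc1 hci) hj
        have hre : r - i + 1 = c + PySem.List.pyGetD rad c 0 - i := by omega
        rw [hk0def, hre]
        exact this
    · rw [if_neg hir] at hk0def
      subst hk0def
      exact ⟨le_refl 0, by omega, by omega, fun j hj0 hj => by omega⟩
  simp only [pvManacherStep]
  set k0 := (if i ≤ r then min (PySem.List.pyGetD rad (l + r + 1 - i) 0) (r - i + 1) else 0)
    with hk0def
  obtain ⟨h00, h01, h02, h03⟩ := hk0 k0 hk0def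
  set k := pvExtend p i k0 p.length with hkdef
  have hk : pvChar p i k := pvExtend_char p i p.length k0 h00 h01 h02 h03 (by omega)
  have hkb : 0 ≤ k ∧ k ≤ i ∧ i + k ≤ (p.length : Int) := ⟨hk.1, hk.2.1, hk.2.2.1⟩
  have hilen : i < ((PySem.List.pySetD rad i k).length : Int) := by
    rw [PySem.List.pySetD_of_nonneg rad k (by omega), List.length_set, hlen]
    push_cast; omega
  have hlen' : (PySem.List.pySetD rad i k).length = p.length + 1 := by
    rw [PySem.List.pySetD_of_nonneg rad k (by omega), List.length_set, hlen]
  have hget : ∀ t : Int, 0 ≤ t → t < (p.length : Int) + 1 →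
      PySem.List.pyGetD (PySem.List.pySetD rad i k) t 0
        = if t = i then k else PySem.List.pyGetD rad t 0 := by
    intro t ht0 ht1
    refine pvGetSet rad i t k (by omega) (by rw [hlen]; push_cast; omega) ht0 ?_
    rw [hlen]; push_cast; omega
  have hchar' : ∀ t : Int, 1 ≤ t → t < i + 1 →
      pvChar p t (PySem.List.pyGetD (PySem.List.pySetD rad i k) t 0) := by
    intro t ht1 hti
    rw [hget t (by omega) (by omega)]
    rcases eq_or_ne t i with rfl | hne
    · rw [if_pos rfl]; exact hk
    · rw [if_neg hne]; exact hchar t ht1 (by omega)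
  split
  · next hgt =>
    refine ⟨hlen', hchar', Or.inr ⟨i, h1i, by omega, ?_, ?_⟩⟩
    · rw [hget i (by omega) (by omega), if_pos rfl]
    · rw [hget i (by omega) (by omega), if_pos rfl]
  · next hle =>
    refine ⟨hlen', hchar', ?_⟩
    rcases hwin with ⟨hl, hr⟩ | ⟨c, hc1, hci, hl, hr⟩
    · exact Or.inl ⟨hl, hr⟩
    · refine Or.inr ⟨c, hc1, by omega, ?_, ?_⟩ <;>
        rw [hget c (by omega) (by omega), if_neg (by omega)] <;> omega

lemma pvInv_final (p : List String) :
    pvInv p (p.length : Int)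
      ((PySem.List.pyRange 1 (p.length : Int) 1).foldl (pvManacherStep p)
        (List.replicate (p.length + 1) 0, 0, -1)) := by
  have hinit : pvInv p 1 (List.replicate (p.length + 1) 0, 0, -1) := by
    refine ⟨by simp, fun t ht1 ht2 => by omega, Or.inl ⟨rfl, rfl⟩⟩
  have step : ∀ m : Nat, (1 + (m : Int)) ≤ (p.length : Int) →
      pvInv p (1 + m) ((PySem.List.pyRange 1 (1 + m) 1).foldl (pvManacherStep p)
        (List.replicate (p.length + 1) 0, 0, -1)) := by
    intro m
    induction m with
    | zero =>
      intro _
      rw [show ((0 : Nat) : Int) = 0 by rfl]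
      rw [PySem.List.pyRange_one_eq_nil (by omega)]
      simpa using hinit
    | succ m ih =>
      intro hle
      have e : 1 + ((m + 1 : Nat) : Int) = (1 + (m : Int)) + 1 := by push_cast; ring
      rw [e, PySem.List.pyRange_one_succ_right (by omega), List.foldl_append,
        List.foldl_cons, List.foldl_nil]
      exact pvInv_step p (1 + m) _ (by omega) (by omega) (ih (by omega))
  rcases Nat.eq_zero_or_pos p.length with h0 | hpos
  · rw [h0]
    rw [show ((0 : Nat) : Int) = 0 by rfl, PySem.List.pyRange_one_eq_nil (by omega)]
    refine ⟨by simp [h0], fun t ht1 ht2 => by omega, Or.inl ⟨rfl, rfl⟩⟩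
  · have := step (p.length - 1) (by omega)
    have e : 1 + ((p.length - 1 : Nat) : Int) = (p.length : Int) := by
      push_cast [hpos]; omega
    rwa [e] at this

-- A's generator condition is exactly "the characterised radius reaches the boundary"
lemma pvCondA_iff (p : List String) (i k : Int) (_h1 : 1 ≤ i) (_h2 : i < (p.length : Int))
    (hk : pvChar p i k) :
    ((PySem.List.pyRange 0 (min i ((p.length : Int) - i)) 1).all
        (fun j => PySem.List.pyGet? p (i - 1 - j) == PySem.List.pyGet? p (i + j)) = true)
      ↔ min i ((p.length : Int) - i) ≤ k := by
  obtain ⟨hk0, hk1, hk2, hk3, hk4⟩ := hk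
  rw [List.all_eq_true]
  have pair : ∀ j : Int, 0 ≤ j → j < i → i + j < (p.length : Int) →
      (((PySem.List.pyGet? p (i - 1 - j) == PySem.List.pyGet? p (i + j)) = true)
        ↔ PySem.List.pyGetD p (i - j - 1) "" = PySem.List.pyGetD p (i + j) "") := by
    intro j hj0 hj1 hj2
    have e : i - 1 - j = i - j - 1 := by ring
    rw [e, PySem.List.pyGet?_eq_some_getElem p (by omega) (by omega),
      PySem.List.pyGet?_eq_some_getElem p (by omega) (by omega),
      PySem.List.pyGetD_eq_getElem p "" (i := i - j - 1) (by omega) (by omega),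
      PySem.List.pyGetD_eq_getElem p "" (i := i + j) (by omega) (by omega)]
    simp
  constructor
  · intro hall
    by_contra hlt
    apply hk4
    refine ⟨by omega, by omega, ?_⟩
    have hm := hall k (PySem.List.mem_pyRange_one.mpr ⟨hk0, by omega⟩)
    exact (pair k hk0 (by omega) (by omega)).mp hm
  · intro hle j hj
    rw [PySem.List.mem_pyRange_one] at hj
    exact (pair j hj.1 (by omega) (by omega)).mpr (hk3 j hj.1 (by omega))

lemma pv_fold_congr (l : List Int) (acc : List Int) (f g : Int → Prop)
    [DecidablePred f] [DecidablePred g] (h : ∀ i ∈ l, f i ↔ g i) :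
    l.foldl (fun r i => if f i then PySem.Set.add r i else r) acc
      = l.foldl (fun r i => if g i then PySem.Set.add r i else r) acc := by
  induction l generalizing acc with
  | nil => rfl
  | cons a l ih =>
    simp only [List.foldl_cons]
    rw [if_congr (h a (List.mem_cons_self ..)) rfl rfl]
    exact ih _ (fun i hi => h i (List.mem_cons_of_mem _ hi))

-- ===== VERDICT (by name: the statement is the Claim_ definition above) =====
theorem analyse_vertically_spec : Claim_equal_analyse_vertically := by
  intro pattern _
  unfold Spec_analyse_vertically analyse_vertically analyse_vertically_alt
  simp only [PySem.List.len_eq]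
  obtain ⟨-, hchar, -⟩ := pvInv_final pattern
  refine pv_fold_congr _ _ _ _ ?_
  intro i hi
  rw [PySem.List.mem_pyRange_one] at hi
  exact pvCondA_iff pattern i _ hi.1 hi.2 (hchar i hi.1 hi.2)
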